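-- pv_equiv track=rewrite | github.com/vetos5/labs_py_I | fibonacci/fibonacci.py | fibonacci_bordered
-- ===== SOURCE A (Python) =====
-- def fibonacci_bordered(input_values, border):
--
--     if len(input_values) < 2:
--         return input_values
--     result = input_values[-1] + input_values[-2]
--     if result > border:
--         return input_values
--     if result <= border:
--         result = input_values + [result]
--     return fibonacci_bordered(result, border)
-- ===== SOURCE B (Python) =====
-- def fibonacci_bordered(input_values, border):
--     seq = list(input_values)
--     if len(seq) < 2:
--         return seq
--     a, b = seq[-2], seq[-1]
--     while True:
--         nxt = a + b
--         if nxt > border: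
--             return seq
--         seq.append(nxt)
--         a, b = b, nxt
-- ===== Notes on version B (the rewrite author's own statement) =====
-- stated objective: simpler
-- what changed: Replaced A's recursion, which rebuilds the list by concatenation and re-reads the last two elements by indexing on every call, with a single iterative loop that carries the last two terms (a, b) as running state and appends to one growing list.
import Mathlib
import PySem

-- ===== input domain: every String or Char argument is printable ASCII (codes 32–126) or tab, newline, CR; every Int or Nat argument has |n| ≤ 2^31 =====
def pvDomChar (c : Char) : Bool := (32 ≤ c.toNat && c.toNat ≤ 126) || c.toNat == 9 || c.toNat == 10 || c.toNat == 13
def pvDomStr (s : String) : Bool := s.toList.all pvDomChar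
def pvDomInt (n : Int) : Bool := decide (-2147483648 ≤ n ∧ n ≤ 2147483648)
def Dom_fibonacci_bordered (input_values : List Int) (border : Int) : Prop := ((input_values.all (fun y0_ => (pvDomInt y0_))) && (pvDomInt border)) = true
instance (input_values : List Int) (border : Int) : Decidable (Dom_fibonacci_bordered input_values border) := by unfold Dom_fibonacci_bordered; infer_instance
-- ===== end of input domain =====

-- B replaces A's recursion (rebuilding the list by concatenation and re-indexing the last two
-- elements each call) with one iterative loop carrying the last two terms as state; return-value
-- equivalence only (neither program mutates the caller's argument).


-- ===== PORT A =====
-- A is recursive and diverges on some inputs; the recursion is made total with a fuel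
-- parameter (1000 = CPython's recursion limit), never exhausted on inputs satisfying Pre_.
def fibAuxA (border : Int) : Nat → List Int → List Int
  | 0, input_values => input_values
  | n + 1, input_values =>
    if input_values.length < 2 then input_values
    else
      match PySem.List.pyGet? input_values (-1), PySem.List.pyGet? input_values (-2) with
      | some x1, some x2 =>
        let result := x1 + x2
        if result > border then input_values
        else -- the 'if result <= border' branch (¬ result > border ↔ result ≤ border)
          fibAuxA border n (input_values ++ [result])
      | _, _ => input_values  -- unreachable: both indices are in range when length ≥ 2

def fibonacci_bordered (input_values : List Int) (border : Int) : List Int :=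
  fibAuxA border 1000 input_values

-- ===== PORT B =====
-- the 'while True' loop of Source B, carrying (a, b) = the last two terms and the growing seq;
-- same fuel guard 1000 to make it total (never exhausted on inputs satisfying Pre_).
def fibLoopB (border : Int) : Nat → Int → Int → List Int → List Int
  | 0, _, _, seq => seq
  | n + 1, a, b, seq =>
    let nxt := a + b
    if nxt > border then seq
    else fibLoopB border n b nxt (seq ++ [nxt])

def fibonacci_bordered_alt (input_values : List Int) (border : Int) : List Int :=
  if input_values.length < 2 then input_values
  else
    match PySem.List.pyGet? input_values (-2), PySem.List.pyGet? input_values (-1) with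
    | some a, some b => fibLoopB border 1000 a b input_values
    | _, _ => input_values  -- unreachable: both indices are in range when length ≥ 2

-- ===== PRECONDITION & SPEC =====
-- Pre_ excludes exactly the inputs on which Python A never returns (infinite recursion /
-- RecursionError): lists of length ≥ 2 whose Fibonacci-style tail-recurrence from the last two
-- elements (a, b) stays ≤ border forever.  It keeps length < 2, an immediate stop
-- (a + b > border), and every start from which the recurrence provably diverges to +∞
-- (a + b ≥ 1 ∧ a + 2b ≥ 1, an invariant of the step (a, b) ↦ (b, a + b)).
def Pre_fibonacci_bordered (input_values : List Int) (border : Int) : Prop :=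
  input_values.length < 2 ∨
    (let a := (PySem.List.pyGet? input_values (-2)).getD 0
     let b := (PySem.List.pyGet? input_values (-1)).getD 0
     a + b > border ∨ (1 ≤ a + b ∧ 1 ≤ a + 2 * b))
instance (input_values : List Int) (border : Int) : Decidable (Pre_fibonacci_bordered input_values border) := by
  unfold Pre_fibonacci_bordered; infer_instance

def pvWitness_fibonacci_bordered : List Int × Int := ([1, 1], 100)

def Spec_fibonacci_bordered (input_values : List Int) (border : Int) (out : List Int) : Prop := out = fibonacci_bordered_alt input_values border
instance (input_values : List Int) (border : Int) (out : List Int) : Decidable (Spec_fibonacci_bordered input_values border out) := by unfold Spec_fibonacci_bordered; infer_instance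

-- ===== CLAIM (what is proved, stated in full; the proofs are below) =====
def Claim_equal_fibonacci_bordered : Prop := ∀ (input_values : List Int) (border : Int), Dom_fibonacci_bordered input_values border → Pre_fibonacci_bordered input_values border → Spec_fibonacci_bordered input_values border (fibonacci_bordered input_values border)

-- ===== LEMMAS AND PROOFS =====

-- with fewer than two elements A returns immediately, whatever the fuel
lemma fibAuxA_of_short (border : Int) (xs : List Int) (h : xs.length < 2) :
    ∀ n, fibAuxA border n xs = xs
  | 0 => rfl
  | _ + 1 => by simp only [fibAuxA, if_pos h]

-- xs[-2] of xs ++ [c] is the last element of xs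
lemma pyGet?_neg_two_append_singleton (xs : List Int) (c : Int) (h : xs ≠ []) :
    PySem.List.pyGet? (xs ++ [c]) (-2) = xs.getLast? := by
  rw [PySem.List.pyGet?_neg_ofNat (xs ++ [c]) 2 (by omega)
      (by simp; have := List.length_pos_iff.mpr h; omega)]
  have hlen : (xs ++ [c]).length - 2 = xs.length - 1 := by simp
  rw [hlen, List.getElem?_append_left (by have := List.length_pos_iff.mpr h; omega)]
  exact List.getLast?_eq_getElem?.symm

-- the core step-for-step agreement: for any common fuel, A's recursion from xs (whose last two
-- elements are a, b) computes exactly B's loop with state (a, b, xs)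
lemma fibAuxA_eq_fibLoopB (border : Int) :
    ∀ (n : Nat) (xs : List Int) (a b : Int),
      2 ≤ xs.length →
      PySem.List.pyGet? xs (-2) = some a →
      PySem.List.pyGet? xs (-1) = some b →
      fibAuxA border n xs = fibLoopB border n a b xs := by
  intro n
  induction n with
  | zero => intro xs a b _ _ _; rfl
  | succ n ih =>
    intro xs a b hlen h2 h1
    simp only [fibAuxA, fibLoopB, h1, h2]
    rw [if_neg (by omega)]
    by_cases hb : b + a > border
    · rw [if_pos hb, if_pos (by omega)]
    · rw [if_neg hb, if_neg (by omega)]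
      have hne : xs ≠ [] := by intro h; subst h; simp at hlen
      have hlast : xs.getLast? = some b := by
        rw [← PySem.List.pyGet?_neg_one]; exact h1
      have hadd : a + b = b + a := by ring
      rw [hadd]
      exact ih (xs ++ [b + a]) b (b + a) (by simp; omega)
        (by rw [pyGet?_neg_two_append_singleton xs _ hne]; exact hlast)
        (PySem.List.pyGet?_neg_one_append_singleton xs (b + a))

-- ===== VERDICT (by name: the statement is the Claim_ definition above) =====
theorem fibonacci_bordered_spec : Claim_equal_fibonacci_bordered := by
  intro input_values border _ _
  unfold Spec_fibonacci_bordered fibonacci_bordered fibonacci_bordered_alt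
  by_cases hlen : input_values.length < 2
  · rw [if_pos hlen]
    exact fibAuxA_of_short border input_values hlen 1000
  · rw [if_neg hlen]
    have h2 : PySem.List.pyGet? input_values (-2) =
        some (input_values[input_values.length - 2]'(by omega)) := by
      rw [PySem.List.pyGet?_neg_ofNat input_values 2 (by omega) (by omega)]
      exact List.getElem?_eq_getElem _
    have h1 : PySem.List.pyGet? input_values (-1) =
        some (input_values[input_values.length - 1]'(by omega)) := by
      rw [PySem.List.pyGet?_neg_ofNat input_values 1 (by omega) (by omega)]
      exact List.getElem?_eq_getElem _
    rw [h2, h1]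
    exact fibAuxA_eq_fibLoopB border 1000 input_values _ _ (by omega) h2 h1
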